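-- pv_equiv track=rewrite | github.com/Jane11111/Leetcode2021 | Ali002.py | solve
-- ===== SOURCE A (Python) =====
-- class TreeNode:
--
--     def __init__(self,val,left= None,right=None):
--         self.val = val
--
--         self.left = left
--         self.right =right
--
-- def findDepth(root,thres):
--
--     if not root:
--         return 0,0,True
--
--     l1,l2,lf = findDepth(root.left,thres)
--     r1,r2,rf = findDepth(root.right,thres)
--
--     if not lf or not rf:
--         return -1,-1,False
--
--     l = l1+1
--     r = r2+1
--     if abs(l-r) > thres:
--         return -1,-1,False
--     return l,r,True
--
-- def solve(arr,n):
--     root = TreeNode(arr[0])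
--     thres = min(11,n//2)
--
--     for i in range(1,n):
--
--         num = arr[i]
--         cur_p = TreeNode(num)
--
--         p = root
--         while True:
--             if num<p.val:
--                 if p.left == None:
--                     p.left = cur_p
--                     break
--                 else:
--                     p = p.left
--             else:
--                 if p.right == None:
--                     p.right = cur_p
--                     break
--                 else:
--                     p = p.right
--     n1,n2,f = findDepth(root,thres)
--     return f
-- ===== SOURCE B (Python) =====
-- def solve(arr, n):
--     # Recursive value-partition construction of the BST (no node objects, no
--     # pointer descent): the insertion BST of a sequence is its head as root,
--     # smaller later elements building the left subtree, others the right.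
--     def build(seq):
--         if not seq:
--             return None
--         root = seq[0]
--         rest = seq[1:]
--         return (root,
--                 build([x for x in rest if x < root]),
--                 build([x for x in rest if x >= root]))
--
--     thres = min(11, n // 2)
--
--     def check(t):
--         # returns (leftmost depth, rightmost depth, balanced flag)
--         if t is None:
--             return 0, 0, True
--         _, lt, rt = t
--         l1, _, lf = check(lt)
--         _, r2, rf = check(rt)
--         l, r = l1 + 1, r2 + 1
--         return l, r, lf and rf and abs(l - r) <= thres
--
--     seq = [arr[0]] + [arr[i] for i in range(1, n)]
--     return check(build(seq))[2]
-- ===== Notes on version B (the rewrite author's own statement) =====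
-- stated objective: alternative
-- what changed: Replaces A's per-element pointer-mutating BST descent (node objects, while-loop insertion) by a recursive value-partition construction of the same tree (head = root, smaller tail elements build the left subtree, the rest the right), and folds the balance check into one flag without A's -1 sentinels.
import Mathlib
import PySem

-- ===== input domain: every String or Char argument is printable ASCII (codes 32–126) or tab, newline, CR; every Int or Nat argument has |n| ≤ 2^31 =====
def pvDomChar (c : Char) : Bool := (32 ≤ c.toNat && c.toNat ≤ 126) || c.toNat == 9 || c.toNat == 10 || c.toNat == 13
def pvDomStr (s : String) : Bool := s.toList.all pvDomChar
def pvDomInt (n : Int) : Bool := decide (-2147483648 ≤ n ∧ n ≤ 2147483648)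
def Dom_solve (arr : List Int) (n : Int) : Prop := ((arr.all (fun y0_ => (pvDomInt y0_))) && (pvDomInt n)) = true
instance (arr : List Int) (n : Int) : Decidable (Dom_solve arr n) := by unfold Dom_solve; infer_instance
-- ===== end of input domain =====

-- B replaces A's pointer-mutating per-element BST descent by a recursive
-- value-partition construction of the same tree (alternative decomposition;
-- return value only — A never exposes its mutated nodes).

inductive PTree where
  | nil : PTree
  | node : Int → PTree → PTree → PTree
deriving DecidableEq, Repr

-- ===== PORT A =====
-- the while-loop descent of A's insertion, rendered as the standard recursive re-build of the search path
def insertA : PTree → Int → PTree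
  | .nil, num => .node num .nil .nil
  | .node v l r, num =>
    if num < v then .node v (insertA l num) r else .node v l (insertA r num)

def findDepthA (th : Int) : PTree → Int × Int × Bool
  | .nil => (0, 0, true)
  | .node _ l r =>
    let (l1, _, lf) := findDepthA th l
    let (_, r2, rf) := findDepthA th r
    if !lf || !rf then (-1, -1, false)
    else
      let ll := l1 + 1
      let rr := r2 + 1
      if |ll - rr| > th then (-1, -1, false) else (ll, rr, true)

def solve (arr : List Int) (n : Int) : Bool :=
  match PySem.List.pyGet? arr 0 with
  | none => false   -- IndexError (arr empty); excluded by Pre_solve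
  | some a0 =>
    let thres := min 11 (PySem.Int.floordiv n 2)
    let root := (PySem.List.pyRange 1 n 1).foldl
      (fun t i => match PySem.List.pyGet? arr i with
        | some num => insertA t num
        | none => t)   -- IndexError (n > len(arr)); excluded by Pre_solve
      (PTree.node a0 .nil .nil)
    (findDepthA thres root).2.2

-- ===== PORT B =====
def buildB : List Int → PTree
  | [] => .nil
  | x :: rest =>
    .node x (buildB (rest.filter (fun y => y < x)))
            (buildB (rest.filter (fun y => !(y < x))))
termination_by s => s.length
decreasing_by
  all_goals simp
  all_goals exact le_trans (List.length_filter_le _ _) (by simp)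

def checkB (th : Int) : PTree → Int × Int × Bool
  | .nil => (0, 0, true)
  | .node _ lt rt =>
    let (l1, _, lf) := checkB th lt
    let (_, r2, rf) := checkB th rt
    let l := l1 + 1
    let r := r2 + 1
    (l, r, lf && rf && decide (|l - r| ≤ th))

def solve_alt (arr : List Int) (n : Int) : Bool :=
  let thres := min 11 (PySem.Int.floordiv n 2)
  let seq := PySem.List.pyGetD arr 0 0 ::
    (PySem.List.pyRange 1 n 1).map (fun i => PySem.List.pyGetD arr i 0)
  (checkB thres (buildB seq)).2.2

-- ===== PRECONDITION & SPEC =====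
-- exactly the inputs on which A returns: arr nonempty (arr[0] is always read) and
-- n ≤ len(arr) (each index of range(1, n) is read; IndexError otherwise)
def Pre_solve (arr : List Int) (n : Int) : Prop := arr ≠ [] ∧ n ≤ arr.length
instance (arr : List Int) (n : Int) : Decidable (Pre_solve arr n) := by
  unfold Pre_solve; infer_instance

def pvWitness_solve : List Int × Int := ([3, 1, 2], 3)

def Spec_solve (arr : List Int) (n : Int) (out : Bool) : Prop := out = solve_alt arr n
instance (arr : List Int) (n : Int) (out : Bool) : Decidable (Spec_solve arr n out) := by
  unfold Spec_solve; infer_instance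

-- ===== CLAIM (what is proved, stated in full; the proofs are below) =====
def Claim_equal_solve : Prop :=
  ∀ (arr : List Int) (n : Int), Dom_solve arr n → Pre_solve arr n → Spec_solve arr n (solve arr n)

-- ===== LEMMAS AND PROOFS =====

-- A's findDepth agrees with B's check: same triple when balanced, (-1,-1,false) otherwise.
theorem fd_eq (th : Int) : ∀ t : PTree,
    findDepthA th t = if (checkB th t).2.2 = true then checkB th t else (-1, -1, false)
  | .nil => by simp [findDepthA, checkB]
  | .node v l r => by
    have hl := fd_eq th l
    have hr := fd_eq th r
    rcases hcl : checkB th l with ⟨l1, l2, lf⟩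
    rcases hcr : checkB th r with ⟨r1, r2, rf⟩
    rw [hcl] at hl; rw [hcr] at hr
    simp only [findDepthA, checkB, hcl, hcr, hl, hr]
    cases lf <;> cases rf <;>
      by_cases hc : |l1 + 1 - (r2 + 1)| ≤ th <;> simp_all

-- the flags alone are always equal
theorem fd_flag (th : Int) (t : PTree) : (findDepthA th t).2.2 = (checkB th t).2.2 := by
  rw [fd_eq]
  by_cases h : (checkB th t).2.2 = true <;> simp [h]

-- one insertion = appending the element to the build sequence
theorem ins_build (s : List Int) (x : Int) : insertA (buildB s) x = buildB (s ++ [x]) := by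
  match s with
  | [] => simp [buildB.eq_def, insertA]
  | y :: t =>
    by_cases h : x < y
    · have := ins_build (t.filter (fun z => z < y)) x
      simp [buildB, insertA, h, List.filter_append, this]
    · have := ins_build (t.filter (fun z => !(z < y))) x
      simp [buildB, insertA, h, List.filter_append, this]
termination_by s.length
decreasing_by
  all_goals exact Nat.lt_succ_of_le (List.length_filter_le _ _)

-- folding insertions = building from the concatenated sequence
theorem foldl_ins (xs s : List Int) :
    xs.foldl insertA (buildB s) = buildB (s ++ xs) := by
  induction xs generalizing s with
  | nil => simp
  | cons x xs ih =>
    simp only [List.foldl_cons, ins_build]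
    rw [ih]
    simp

-- B's indexed comprehension is the taken segment itself
theorem map_range (arr : List Int) (j k : Nat) (hk : k ≤ arr.length) :
    (PySem.List.pyRange (j : Int) (k : Int) 1).map (fun i => PySem.List.pyGetD arr i 0)
    = (arr.take k).drop j := by
  by_cases hjk : k ≤ j
  · rw [PySem.List.pyRange_one_eq_nil (by exact_mod_cast hjk)]
    rw [List.drop_eq_nil_of_le (by simpa using le_trans (min_le_left _ _) hjk)]
    simp
  · have hjk' : j < k := by omega
    rw [PySem.List.pyRange_one_cons (by exact_mod_cast hjk')]
    have hjlen : j < arr.length := lt_of_lt_of_le hjk' hk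
    have hdrop : (arr.take k).drop j = arr[j] :: (arr.take k).drop (j + 1) := by
      rw [List.drop_eq_getElem_cons (by simp; omega)]
      congr 1
      exact List.getElem_take
    rw [hdrop]
    simp only [List.map_cons, PySem.List.pyGetD_natCast, List.getD,
      List.getElem?_eq_getElem hjlen, Option.getD_some]
    have : ((j : Int) + 1) = ((j + 1 : Nat) : Int) := by push_cast; ring
    rw [this, map_range arr (j + 1) k hk]
termination_by k - j
decreasing_by omega

-- A's indexed range loop is the plain foldl over the taken segment
theorem foldl_range (arr : List Int) (j k : Nat) (hk : k ≤ arr.length) (t0 : PTree) :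
    (PySem.List.pyRange (j : Int) (k : Int) 1).foldl
      (fun t i => match PySem.List.pyGet? arr i with
        | some num => insertA t num
        | none => t) t0
    = ((arr.take k).drop j).foldl insertA t0 := by
  by_cases hjk : k ≤ j
  · rw [PySem.List.pyRange_one_eq_nil (by exact_mod_cast hjk)]
    rw [List.drop_eq_nil_of_le (by simpa using le_trans (min_le_left _ _) hjk)]
    simp [List.foldl]
  · have hjk' : j < k := by omega
    rw [PySem.List.pyRange_one_cons (by exact_mod_cast hjk')]
    have hjlen : j < arr.length := lt_of_lt_of_le hjk' hk
    have hdrop : (arr.take k).drop j = arr[j] :: (arr.take k).drop (j + 1) := by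
      rw [List.drop_eq_getElem_cons (by simp; omega)]
      congr 1
      exact List.getElem_take
    rw [hdrop]
    simp only [List.foldl_cons, PySem.List.pyGet?_natCast, List.getElem?_eq_getElem hjlen]
    have : ((j : Int) + 1) = ((j + 1 : Nat) : Int) := by push_cast; ring
    rw [this, foldl_range arr (j + 1) k hk]
termination_by k - j
decreasing_by omega

-- ===== VERDICT (by name: the statement is the Claim_ definition above) =====
theorem solve_spec : Claim_equal_solve := by
  intro arr n _ hpre
  obtain ⟨h1, h2⟩ := hpre
  unfold Spec_solve
  obtain ⟨a, arr', rfl⟩ : ∃ a arr', arr = a :: arr' := by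
    cases arr with
    | nil => exact absurd rfl h1
    | cons a arr' => exact ⟨a, arr', rfl⟩
  by_cases hn : n ≤ 1
  · -- range(1, n) is empty: both trees are the single root node
    simp only [solve, solve_alt, PySem.List.pyGet?_zero_cons,
      PySem.List.pyGetD_zero_cons, PySem.List.pyRange_one_eq_nil hn,
      List.foldl_nil, List.map_nil]
    rw [show PTree.node a .nil .nil = buildB [a] by simp [buildB.eq_def]]
    exact fd_flag _ _
  · obtain ⟨nn, rfl⟩ : ∃ nn : Nat, n = (nn : Int) :=
      ⟨n.toNat, (Int.toNat_of_nonneg (by omega)).symm⟩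
    have hnn2 : nn ≤ (a :: arr').length := by exact_mod_cast h2
    simp only [solve, solve_alt, PySem.List.pyGet?_zero_cons,
      PySem.List.pyGetD_zero_cons]
    have hfold := foldl_range (a :: arr') 1 nn hnn2 (.node a .nil .nil)
    have hmap := map_range (a :: arr') 1 nn hnn2
    norm_num at hfold hmap
    rw [hfold, hmap]
    rw [show PTree.node a .nil .nil = buildB [a] by simp [buildB.eq_def]]
    rw [foldl_ins]
    exact fd_flag _ _
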